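-- pv_equiv track=rewrite | github.com/cirosantilli/project-euler-solvers | solvers/367.py | remaining_partition
-- ===== SOURCE A (Python) =====
-- from typing import Iterable, List, Set, Tuple
--
-- Partition = Tuple[int, ...]
--
-- Cell = Tuple[int, int]
--
-- def remaining_partition(part: Partition, removed: Set[Cell]) -> Partition | None:
--     """
--     Remove cells and return the remaining partition (left-justified), or None if invalid.
--     """
--     new: List[int] = []
--     for r, ln in enumerate(part):
--         remaining_cols = [c for c in range(ln) if (r, c) not in removed]
--         if not remaining_cols:
--             new_len = 0
--         else:
--             new_len = max(remaining_cols) + 1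
--             # Ensure contiguity: remaining cells must be columns 0..new_len-1
--             for c in range(new_len):
--                 if (r, c) in removed:
--                     return None
--         new.append(new_len)
--
--     # Trim trailing zeros
--     while new and new[-1] == 0:
--         new.pop()
--
--     # Must be non-increasing row lengths
--     for i in range(len(new) - 1):
--         if new[i] < new[i + 1]:
--             return None
--
--     return tuple(new)
-- ===== SOURCE B (Python) =====
-- def remaining_partition(part, removed):
--     """
--     Remove cells and return the remaining partition (left-justified), or None if invalid.
--     Indexes removed cells by row so each row costs O(its removed cells), not O(its length).
--     """
--     by_row = {}
--     for r, c in removed: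
--         by_row.setdefault(r, set()).add(c)
--     new = []
--     for r, ln in enumerate(part):
--         cols = {c for c in by_row.get(r, ()) if 0 <= c < ln}
--         new_len = ln - len(cols) if ln > 0 else 0
--         # valid iff the removed columns are exactly the suffix new_len..ln-1
--         if cols and min(cols) < new_len:
--             return None
--         new.append(new_len)
--     while new and new[-1] == 0:
--         new.pop()
--     for i in range(len(new) - 1):
--         if new[i] < new[i + 1]:
--             return None
--     return tuple(new)
-- ===== Notes on version B (the rewrite author's own statement) =====
-- stated objective: faster
-- what changed: Instead of scanning every column of every row (list over range(ln) plus a contiguity re-scan), B groups the removed cells by row in a dict of sets and derives each new row length arithmetically as ln minus the number of removed in-range columns, validating contiguity by comparing the minimum removed column against that length.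
import Mathlib
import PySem

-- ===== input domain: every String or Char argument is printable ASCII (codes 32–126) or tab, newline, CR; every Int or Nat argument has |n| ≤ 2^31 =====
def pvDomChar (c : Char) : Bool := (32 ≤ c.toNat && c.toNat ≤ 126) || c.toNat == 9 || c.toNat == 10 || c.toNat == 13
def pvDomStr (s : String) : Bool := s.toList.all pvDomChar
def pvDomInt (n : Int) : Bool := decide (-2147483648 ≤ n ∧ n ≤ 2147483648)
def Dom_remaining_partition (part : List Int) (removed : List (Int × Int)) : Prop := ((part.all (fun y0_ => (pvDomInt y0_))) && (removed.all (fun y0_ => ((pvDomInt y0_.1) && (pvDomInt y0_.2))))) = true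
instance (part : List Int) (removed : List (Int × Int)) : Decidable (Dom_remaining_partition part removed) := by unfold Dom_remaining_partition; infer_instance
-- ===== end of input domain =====

-- B indexes the removed cells by row (dict of sets) and derives each new row length
-- arithmetically from its removed columns, instead of scanning every column of every row: faster.


-- ===== PORT A =====
-- one iteration of A's 'for r, ln in enumerate(part)' body (returns none = 'return None')
def pvARow (removed : List (Int × Int)) (r ln : Int) : Option Int :=
  let remaining_cols := (PySem.List.pyRange 0 ln 1).filter (fun c => !removed.contains (r, c))
  if remaining_cols.isEmpty then
    some 0
  else
    -- max(remaining_cols) + 1 ; the .getD 0 is unreachable (guarded by nonempty)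
    let new_len := (PySem.List.max? remaining_cols (fun x => x)).getD 0 + 1
    -- 'for c in range(new_len): if (r, c) in removed: return None'
    if (PySem.List.pyRange 0 new_len 1).any (fun c => removed.contains (r, c)) then none
    else some new_len

-- common tail, textually identical lines in Source A and Source B:
-- 'while new and new[-1] == 0: new.pop()'  (drop trailing zeros)
def pvTrim : List Int → List Int
  | [] => []
  | x :: xs =>
    match pvTrim xs with
    | [] => if x = 0 then [] else [x]
    | ys => x :: ys

-- 'for i in range(len(new) - 1): if new[i] < new[i+1]: return None'  (true = some ascent)
def pvAscends : List Int → Bool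
  | x :: y :: rest => decide (x < y) || pvAscends (y :: rest)
  | _ => false

def pvALoop (removed : List (Int × Int)) : List (Int × Int) → List Int → Option (List Int)
  | [], new =>
      let t := pvTrim new
      if pvAscends t then none else some t
  | (r, ln) :: rest, new =>
      match pvARow removed r ln with
      | none => none
      | some k => pvALoop removed rest (new ++ [k])

def remaining_partition (part : List Int) (removed : List (Int × Int)) : Option (List Int) :=
  pvALoop removed (PySem.List.enumerate part 0) []

-- ===== PORT B =====
-- 'by_row.setdefault(r, set()).add(c)' for each removed cell (in-place add = overwrite at key)
def pvStep (d : PySem.Dict Int (PySem.Set Int)) (rc : Int × Int) : PySem.Dict Int (PySem.Set Int) :=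
  d.insert rc.1 (PySem.Set.add (d.getD rc.1 PySem.Set.empty) rc.2)

def pvBuildByRow (removed : List (Int × Int)) : PySem.Dict Int (PySem.Set Int) :=
  removed.foldl pvStep PySem.Dict.empty

-- one iteration of B's loop body
def pvBRow (by_row : PySem.Dict Int (PySem.Set Int)) (r ln : Int) : Option Int :=
  let cols : PySem.Set Int :=
    PySem.Set.ofList ((by_row.getD r PySem.Set.empty).filter (fun c => decide (0 ≤ c) && decide (c < ln)))
  let new_len := if 0 < ln then ln - PySem.Set.len cols else 0
  -- 'if cols and min(cols) < new_len: return None' ; the .getD 0 is unreachable (guarded by nonempty)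
  if !cols.isEmpty && decide ((PySem.List.min? cols (fun x => x)).getD 0 < new_len) then none
  else some new_len

def pvBLoop (by_row : PySem.Dict Int (PySem.Set Int)) : List (Int × Int) → List Int → Option (List Int)
  | [], new =>
      let t := pvTrim new
      if pvAscends t then none else some t
  | (r, ln) :: rest, new =>
      match pvBRow by_row r ln with
      | none => none
      | some k => pvBLoop by_row rest (new ++ [k])

def remaining_partition_alt (part : List Int) (removed : List (Int × Int)) : Option (List Int) :=
  pvBLoop (pvBuildByRow removed) (PySem.List.enumerate part 0) []

-- ===== PRECONDITION & SPEC =====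
def Spec_remaining_partition (part : List Int) (removed : List (Int × Int)) (out : Option (List Int)) : Prop := out = remaining_partition_alt part removed
instance (part : List Int) (removed : List (Int × Int)) (out : Option (List Int)) : Decidable (Spec_remaining_partition part removed out) := by unfold Spec_remaining_partition; infer_instance

-- ===== CLAIM (what is proved, stated in full; the proofs are below) =====
def Claim_equal_remaining_partition : Prop := ∀ (part : List Int) (removed : List (Int × Int)), Dom_remaining_partition part removed → Spec_remaining_partition part removed (remaining_partition part removed)

-- ===== LEMMAS AND PROOFS =====

-- membership in the grouped dict
theorem pv_mem_foldl_step (l : List (Int × Int)) (d : PySem.Dict Int (PySem.Set Int)) (r c : Int) :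
    c ∈ (l.foldl pvStep d).getD r PySem.Set.empty ↔ c ∈ d.getD r PySem.Set.empty ∨ (r, c) ∈ l := by
  induction l generalizing d with
  | nil => simp
  | cons hd tl ih =>
    obtain ⟨a, b⟩ := hd
    rw [List.foldl_cons, ih]
    unfold pvStep
    rw [PySem.Dict.getD_insert]
    by_cases h : r = a
    · subst h
      rw [if_pos rfl, PySem.Set.mem_add]
      simp only [List.mem_cons, Prod.mk.injEq, true_and]
      tauto
    · simp only [if_neg h, List.mem_cons, Prod.mk.injEq]
      constructor
      · rintro (h' | h')
        · exact Or.inl h'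
        · exact Or.inr (Or.inr h')
      · rintro (h' | ⟨h1, h2⟩ | h')
        · exact Or.inl h'
        · exact absurd h1 h
        · exact Or.inr h'

theorem pv_mem_byRow (removed : List (Int × Int)) (r c : Int) :
    c ∈ (pvBuildByRow removed).getD r PySem.Set.empty ↔ (r, c) ∈ removed := by
  unfold pvBuildByRow
  rw [pv_mem_foldl_step]
  simp [PySem.Dict.getD_empty, PySem.Set.empty]

-- the core per-row equivalence, over an abstract removal predicate p and a duplicate-free
-- list 'cols' of exactly the removed columns inside [0, ln)
theorem pv_row_core (p : Int → Bool) (ln : Int) (cols : List Int)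
    (hnd : cols.Nodup) (hmem : ∀ c, c ∈ cols ↔ (0 ≤ c ∧ c < ln ∧ p c = true)) :
    (if ((PySem.List.pyRange 0 ln 1).filter (fun c => !p c)).isEmpty then some 0
     else if (PySem.List.pyRange 0 ((PySem.List.max? ((PySem.List.pyRange 0 ln 1).filter (fun c => !p c)) (fun x => x)).getD 0 + 1) 1).any p then none
     else some ((PySem.List.max? ((PySem.List.pyRange 0 ln 1).filter (fun c => !p c)) (fun x => x)).getD 0 + 1))
    = (if !cols.isEmpty && decide ((PySem.List.min? cols (fun x => x)).getD 0 < (if 0 < ln then ln - PySem.Set.len cols else 0)) then (none : Option Int)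
       else some (if 0 < ln then ln - PySem.Set.len cols else 0)) := by
  have hsetlen : PySem.Set.len cols = (cols.length : Int) := by
    simp [PySem.Set.len]
  by_cases hln : 0 < ln
  case neg =>
    have hLnil : PySem.List.pyRange 0 ln 1 = [] := PySem.List.pyRange_one_eq_nil (by omega)
    have hcols : cols = [] := by
      rw [List.eq_nil_iff_forall_not_mem]
      intro a ha; have := (hmem a).mp ha; omega
    simp [hLnil, hcols, hln]
  case pos =>
    have hmemL : ∀ a : Int, a ∈ PySem.List.pyRange 0 ln 1 ↔ 0 ≤ a ∧ a < ln := by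
      intro a; rw [PySem.List.mem_pyRange_one]
    have hndL : (PySem.List.pyRange 0 ln 1).Nodup := PySem.List.nodup_pyRange_one 0 ln
    have hlenL : (PySem.List.pyRange 0 ln 1).length = ln.toNat := by
      rw [PySem.List.length_pyRange_one]; congr 1; omega
    have hndF : ((PySem.List.pyRange 0 ln 1).filter p).Nodup := hndL.filter _
    have hmemF : ∀ a, a ∈ (PySem.List.pyRange 0 ln 1).filter p ↔ (0 ≤ a ∧ a < ln ∧ p a = true) := by
      intro a; rw [List.mem_filter, hmemL]; tauto
    have hcolsF : ∀ a, a ∈ cols ↔ a ∈ (PySem.List.pyRange 0 ln 1).filter p :=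
      fun a => (hmem a).trans (hmemF a).symm
    have hpermF : cols.Perm ((PySem.List.pyRange 0 ln 1).filter p) :=
      (List.perm_ext_iff_of_nodup hnd hndF).mpr hcolsF
    have hlenle : cols.length ≤ ln.toNat := by
      rw [hpermF.length_eq, ← hlenL]; exact List.length_filter_le _ _
    rw [if_pos hln, hsetlen]
    by_cases hG : ((PySem.List.pyRange 0 ln 1).filter (fun c => !p c)).isEmpty
    · rw [if_pos hG]
      rw [List.isEmpty_iff] at hG
      have hallp : ∀ a : Int, 0 ≤ a → a < ln → p a = true := by
        intro a h1 h2
        by_contra hpa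
        have : a ∈ (PySem.List.pyRange 0 ln 1).filter (fun c => !p c) :=
          List.mem_filter.mpr ⟨(hmemL a).mpr ⟨h1, h2⟩, by simp [hpa]⟩
        rw [hG] at this; simp at this
      have hFL : ((PySem.List.pyRange 0 ln 1).filter p) = PySem.List.pyRange 0 ln 1 := by
        rw [List.filter_eq_self]
        intro a ha
        exact hallp a ((hmemL a).mp ha).1 ((hmemL a).mp ha).2
      have hk0 : ln - (cols.length : Int) = 0 := by
        rw [hpermF.length_eq, hFL, hlenL]; omega
      rw [hk0]
      have hcond : (!cols.isEmpty && decide ((PySem.List.min? cols (fun x => x)).getD 0 < 0)) = false := by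
        cases hmin : PySem.List.min? cols (fun x => x) with
        | none => rw [PySem.List.min?_eq_none_iff] at hmin; simp [hmin]
        | some m =>
          have h0m := ((hmem m).mp (PySem.List.min?_mem hmin)).1
          simp; omega
      rw [hcond, if_neg (by simp)]
    · rw [if_neg hG]
      rw [List.isEmpty_iff] at hG
      obtain ⟨M, hM⟩ : ∃ M, PySem.List.max? ((PySem.List.pyRange 0 ln 1).filter (fun c => !p c)) (fun x => x) = some M := by
        cases h : PySem.List.max? ((PySem.List.pyRange 0 ln 1).filter (fun c => !p c)) (fun x => x) with
        | none => rw [PySem.List.max?_eq_none_iff] at h; exact absurd h hG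
        | some M => exact ⟨M, rfl⟩
      rw [hM]
      simp only [Option.getD_some]
      have hMmem := PySem.List.max?_mem hM
      have hML : 0 ≤ M ∧ M < ln := (hmemL M).mp (List.mem_filter.mp hMmem).1
      have hpM : p M = false := by
        have := (List.mem_filter.mp hMmem).2; simpa using this
      have hMmax : ∀ y : Int, 0 ≤ y → y < ln → p y = false → y ≤ M := by
        intro y h1 h2 h3
        exact PySem.List.max?_isMax hM y
          (List.mem_filter.mpr ⟨(hmemL y).mpr ⟨h1, h2⟩, by simp [h3]⟩)
      by_cases hA : (PySem.List.pyRange 0 (M + 1) 1).any p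
      · rw [if_pos hA]
        obtain ⟨c₀, hc₀mem, hpc₀⟩ := List.any_eq_true.mp hA
        have hc₀ : 0 ≤ c₀ ∧ c₀ < M + 1 := by
          have := PySem.List.mem_pyRange_one.mp hc₀mem; omega
        have hc₀cols : c₀ ∈ cols := (hmem c₀).mpr ⟨hc₀.1, by omega, hpc₀⟩
        cases hmin : PySem.List.min? cols (fun x => x) with
        | none =>
          rw [PySem.List.min?_eq_none_iff] at hmin
          rw [hmin] at hc₀cols; simp at hc₀cols
        | some m =>
          have hmle : m ≤ c₀ := PySem.List.min?_isMin hmin c₀ hc₀cols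
          by_cases hcase : m < ln - (cols.length : Int)
          · have hne : cols ≠ [] := List.ne_nil_of_mem hc₀cols
            rw [if_pos (by simp [hne, hcase])]
          · exfalso
            push Not at hcase
            have hge : ∀ a ∈ cols, ln - (cols.length : Int) ≤ a := fun a ha =>
              le_trans hcase (PySem.List.min?_isMin hmin a ha)
            have hsub : cols.toFinset ⊆ Finset.Ico (ln - (cols.length : Int)) ln := by
              intro a ha
              rw [List.mem_toFinset] at ha
              rw [Finset.mem_Ico]
              exact ⟨hge a ha, ((hmem a).mp ha).2.1⟩
            have hcard1 : cols.toFinset.card = cols.length := List.toFinset_card_of_nodup hnd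
            have hcard2 : (Finset.Ico (ln - (cols.length : Int)) ln).card = cols.length := by
              rw [Int.card_Ico]; omega
            have heq : cols.toFinset = Finset.Ico (ln - (cols.length : Int)) ln :=
              Finset.eq_of_subset_of_card_le hsub (by rw [hcard1, hcard2])
            have hMcols : M ∈ cols := by
              have : M ∈ Finset.Ico (ln - (cols.length : Int)) ln :=
                Finset.mem_Ico.mpr ⟨by omega, hML.2⟩
              rw [← heq, List.mem_toFinset] at this
              exact this
            have := ((hmem M).mp hMcols).2.2
            rw [hpM] at this
            exact Bool.false_ne_true this
      · rw [if_neg hA]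
        have hnotp : ∀ c : Int, 0 ≤ c → c < M + 1 → p c = false := by
          intro c h1 h2
          by_contra h
          exact hA (List.any_eq_true.mpr
            ⟨c, PySem.List.mem_pyRange_one.mpr ⟨h1, h2⟩, by simpa using h⟩)
        have hmem' : ∀ a, a ∈ cols ↔ (M + 1 ≤ a ∧ a < ln) := by
          intro a
          rw [hmem]
          constructor
          · rintro ⟨h1, h2, h3⟩
            refine ⟨?_, h2⟩
            by_contra hlt
            push Not at hlt
            rw [hnotp a h1 (by omega)] at h3
            exact Bool.false_ne_true h3
          · rintro ⟨h1, h2⟩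
            refine ⟨by omega, h2, ?_⟩
            by_contra h3
            have := hMmax a (by omega) h2 (by simpa using h3)
            omega
        have hperm2 : cols.Perm (PySem.List.pyRange (M + 1) ln 1) :=
          (List.perm_ext_iff_of_nodup hnd (PySem.List.nodup_pyRange_one (M + 1) ln)).mpr
            (fun a => by rw [hmem' a, PySem.List.mem_pyRange_one])
        have hlen2 : (cols.length : Int) = ln - (M + 1) := by
          have h := hperm2.length_eq
          rw [PySem.List.length_pyRange_one] at h
          omega
        have hkM : ln - (cols.length : Int) = M + 1 := by omega
        rw [hkM]
        have hcond : (!cols.isEmpty && decide ((PySem.List.min? cols (fun x => x)).getD 0 < M + 1)) = false := by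
          cases hmin : PySem.List.min? cols (fun x => x) with
          | none => rw [PySem.List.min?_eq_none_iff] at hmin; simp [hmin]
          | some m =>
            have := (hmem' m).mp (PySem.List.min?_mem hmin)
            simp; omega
        rw [hcond, if_neg (by simp)]

-- row equivalence with the real data
theorem pv_row_eq (removed : List (Int × Int)) (r ln : Int) :
    pvARow removed r ln = pvBRow (pvBuildByRow removed) r ln := by
  unfold pvARow pvBRow
  exact pv_row_core (fun c => removed.contains (r, c)) ln _
    (PySem.Set.nodup_ofList _)
    (fun c => by
      rw [PySem.Set.mem_ofList, List.mem_filter, pv_mem_byRow]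
      simp only [Bool.and_eq_true, decide_eq_true_eq, List.contains_iff_mem]
      tauto)

-- the two loops agree
theorem pv_loop_eq (removed : List (Int × Int)) (l : List (Int × Int)) (acc : List Int) :
    pvALoop removed l acc = pvBLoop (pvBuildByRow removed) l acc := by
  induction l generalizing acc with
  | nil => rfl
  | cons x tl ih =>
    obtain ⟨r, ln⟩ := x
    show (match pvARow removed r ln with
          | none => none
          | some k => pvALoop removed tl (acc ++ [k]))
       = (match pvBRow (pvBuildByRow removed) r ln with
          | none => none
          | some k => pvBLoop (pvBuildByRow removed) tl (acc ++ [k]))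
    rw [pv_row_eq]
    cases pvBRow (pvBuildByRow removed) r ln with
    | none => rfl
    | some k => simp only []; exact ih (acc ++ [k])

-- ===== VERDICT (by name: the statement is the Claim_ definition above) =====
theorem remaining_partition_spec : Claim_equal_remaining_partition := by
  intro part removed _
  show remaining_partition part removed = remaining_partition_alt part removed
  unfold remaining_partition remaining_partition_alt
  exact pv_loop_eq removed _ []
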